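-- pv_equiv track=rewrite | github.com/memory-eight-way/memory | quiz/make-quiz.py | proc_txt_lv50_65_mask_letter_abc
-- ===== SOURCE A (Python) =====
-- MASK_CHAR="_"
--
-- def get_mask_alphabet_lv50(lv):
--     """
--     lv50で使用するマスク用の文字の集合を返す
--     lv50 -> a,A
--     lv51 -> a,b,A,B
--     """
--     w_mask_char=list()
--     w_del_char_l=[chr(i) for i in range(97, 97+(lv-50)+1)] # a,b
--     w_del_char_u=[chr(i) for i in range(65, 65+(lv-50)+1)] # A,B
--     w_mask_char.extend(w_del_char_l)
--     w_mask_char.extend(w_del_char_u)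
--     return w_mask_char
--
-- def is_memory_line(line_info):
--     """
--     記憶対象の行かを確認する
--     行番号. 文章 の構成になっているか
--     """
--     if len(line_info)!=2:
--         # 行番号＋文章の構成でない
--         return False
--
--     if line_info[1].strip()=="":
--         # 行番号＋文章の構成だけど 文章が空
--         return False
--     return True
--
-- def proc_line_mask(line,w_mask_char):
--     wret=list()
--     for wletter in line:
--         if wletter!=" " and wletter in w_mask_char:
--             wret.append(MASK_CHAR)
--         else:
--             wret.append(wletter)
--     return "".join(wret)
--
-- def proc_txt_lv50_65_mask_letter_abc(lines,lv):
--     """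
--     lv50 aの文字を消す
--         lv05よりも簡単になっている・・・
--     lv51 a,bの文字を消す
--     lv65 a-z の文字を消す
--     """
--
--     w_ret=list()
--
--     wcount=0
--     w_mask_char=get_mask_alphabet_lv50(lv)
--
--
--     for line in lines:
--         line_info=line_to_number_body_pair(line)
--         if is_memory_line(line_info):
--             w_new_line=line_info[0]+" "+proc_line_mask(line_info[1],w_mask_char)
--             w_ret.append(w_new_line)
--         else:
--             w_ret.append(line)
--     return w_ret
--
-- def line_to_number_body_pair(wline):
--     w_word=wline.strip().split(".")
--     w_line_number=w_word[0]+"."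
--     w_line_body=".".join(w_word[1:]).strip()
--     return (w_line_number ,w_line_body)
-- ===== SOURCE B (Python) =====
-- MASK_CHAR = "_"
--
-- def proc_txt_lv50_65_mask_letter_abc(lines, lv):
--     n = lv - 50
--     letters = [chr(97 + i) for i in range(n + 1)] + [chr(65 + i) for i in range(n + 1)]
--     out = []
--     for line in lines:
--         head, dot, tail = line.strip().partition(".")
--         body = tail.strip()
--         if dot and body:
--             for c in letters:
--                 body = body.replace(c, MASK_CHAR)
--             out.append(head + ". " + body)
--         else:
--             out.append(line)
--     return out
-- ===== Notes on version B (the rewrite author's own statement) =====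
-- stated objective: alternative
-- what changed: B inverts the traversal: instead of scanning the body character by character and testing membership in a mask list, it makes one str.replace pass over the body per masked letter (a fold of whole-string replaces over the alphabet), and parses each line with a single str.partition at the first dot instead of split('.') plus '.'.join of the tail.
import Mathlib
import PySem

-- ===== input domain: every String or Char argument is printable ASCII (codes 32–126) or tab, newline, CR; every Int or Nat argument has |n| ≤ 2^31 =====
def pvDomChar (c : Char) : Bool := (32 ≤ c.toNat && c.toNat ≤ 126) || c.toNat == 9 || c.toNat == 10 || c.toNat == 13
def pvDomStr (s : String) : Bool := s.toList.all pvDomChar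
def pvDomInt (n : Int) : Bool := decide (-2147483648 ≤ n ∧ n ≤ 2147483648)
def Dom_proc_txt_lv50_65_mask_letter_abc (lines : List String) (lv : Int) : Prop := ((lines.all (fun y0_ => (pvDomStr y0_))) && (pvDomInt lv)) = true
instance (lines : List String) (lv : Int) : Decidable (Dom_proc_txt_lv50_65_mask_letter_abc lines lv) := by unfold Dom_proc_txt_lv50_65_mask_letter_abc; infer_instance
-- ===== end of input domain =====

-- B inverts the traversal: one whole-string str.replace pass per masked letter instead of a
-- per-character membership scan, and str.partition at the first dot instead of split + join.

-- ===== PORT A =====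
-- get_mask_alphabet_lv50; chr(i) is ported as Char.ofNat i.toNat (exact for the code
-- points reachable under Pre_ except surrogates, which equal no printable-ASCII character,
-- so every membership test below agrees with Python's)
def pvMaskAlphabetLv50 (lv : Int) : List Char :=
  let w_del_char_l := (PySem.List.pyRange 97 (97 + (lv - 50) + 1)).map (fun i => Char.ofNat i.toNat)
  let w_del_char_u := (PySem.List.pyRange 65 (65 + (lv - 50) + 1)).map (fun i => Char.ofNat i.toNat)
  w_del_char_l ++ w_del_char_u

-- line_to_number_body_pair (on the line's character list)
def pvLineToNumberBodyPair (wline : List Char) : List Char × List Char :=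
  let w_word := PySem.Chars.splitOn (PySem.Chars.strip wline) ['.']
  -- w_word[0]: str.split always returns a non-empty list, so headD is exact
  (w_word.headD [] ++ ['.'], PySem.Chars.strip (PySem.Chars.join ['.'] (w_word.drop 1)))

-- is_memory_line; len(line_info) != 2 is never true of a pair, so that guard vanishes
def pvIsMemoryLine (line_info : List Char × List Char) : Bool :=
  if PySem.Chars.strip line_info.2 == ([] : List Char) then false else true

-- proc_line_mask
def pvProcLineMask (line : List Char) (w_mask_char : List Char) : List Char :=
  line.foldl (fun wret wletter =>
    wret ++ [if (wletter != ' ') && w_mask_char.contains wletter then '_' else wletter]) []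

def proc_txt_lv50_65_mask_letter_abc (lines : List String) (lv : Int) : List String :=
  let w_mask_char := pvMaskAlphabetLv50 lv
  lines.foldl
    (fun w_ret line =>
      let line_info := pvLineToNumberBodyPair line.toList
      if pvIsMemoryLine line_info then
        w_ret ++ [String.ofList (line_info.1 ++ [' '] ++ pvProcLineMask line_info.2 w_mask_char)]
      else
        w_ret ++ [line])
    []

-- ===== PORT B =====
-- letters = [chr(97+i) for i in range(n+1)] + [chr(65+i) for i in range(n+1)]
def pvLettersB (lv : Int) : List Char :=
  (PySem.List.pyRange 0 ((lv - 50) + 1)).map (fun i => Char.ofNat (97 + i).toNat)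
  ++ (PySem.List.pyRange 0 ((lv - 50) + 1)).map (fun i => Char.ofNat (65 + i).toNat)

-- s.partition(".") for the single-character separator: (before, found?, after)
def pvPartitionDot : List Char → List Char × Bool × List Char
  | [] => ([], false, [])
  | c :: r =>
      if c == '.' then ([], true, r)
      else
        let p := pvPartitionDot r
        (c :: p.1, p.2.1, p.2.2)

def pvRenderB (lv : Int) (line : String) : String :=
  let p := pvPartitionDot (PySem.Chars.strip line.toList)
  let body := PySem.Chars.strip p.2.2
  if p.2.1 = true ∧ body ≠ [] then
    String.ofList (p.1 ++ ['.', ' '] ++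
      (pvLettersB lv).foldl (fun b c => PySem.Chars.replace b [c] ['_']) body)
  else line

def proc_txt_lv50_65_mask_letter_abc_alt (lines : List String) (lv : Int) : List String :=
  lines.map (pvRenderB lv)

-- ===== PRECONDITION & SPEC =====
-- Pre_ excludes exactly lv ≥ 1114065, where BOTH Pythons raise ValueError (chr() beyond 0x10FFFF).
def Pre_proc_txt_lv50_65_mask_letter_abc (_lines : List String) (lv : Int) : Prop :=
  lv ≤ 1114064
instance (lines : List String) (lv : Int) : Decidable (Pre_proc_txt_lv50_65_mask_letter_abc lines lv) := by
  unfold Pre_proc_txt_lv50_65_mask_letter_abc; infer_instance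

def pvWitness_proc_txt_lv50_65_mask_letter_abc : List String × Int := (["1. abc"], 51)

def Spec_proc_txt_lv50_65_mask_letter_abc (lines : List String) (lv : Int) (out : List String) : Prop := out = proc_txt_lv50_65_mask_letter_abc_alt lines lv
instance (lines : List String) (lv : Int) (out : List String) : Decidable (Spec_proc_txt_lv50_65_mask_letter_abc lines lv out) := by unfold Spec_proc_txt_lv50_65_mask_letter_abc; infer_instance

-- ===== CLAIM (what is proved, stated in full; the proofs are below) =====
def Claim_equal_proc_txt_lv50_65_mask_letter_abc : Prop := ∀ (lines : List String) (lv : Int), Dom_proc_txt_lv50_65_mask_letter_abc lines lv → Pre_proc_txt_lv50_65_mask_letter_abc lines lv → Spec_proc_txt_lv50_65_mask_letter_abc lines lv (proc_txt_lv50_65_mask_letter_abc lines lv)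

-- ===== LEMMAS AND PROOFS =====

def pvSplit1 (d : Char) (pre : List Char) : List Char → List (List Char)
  | [] => [pre]
  | c :: rest => if d == c then pre :: pvSplit1 d [] rest else pvSplit1 d (pre ++ [c]) rest

theorem pvSplitOn_go_eq (d : Char) (fuel : Nat) (l cur : List Char) (acc : List (List Char))
    (h : l.length < fuel) :
    PySem.Chars.splitOn.go [d] fuel l cur acc = acc.reverse ++ pvSplit1 d cur.reverse l := by
  induction fuel generalizing l cur acc with
  | zero => omega
  | succ n ih =>
    cases l with
    | nil => rw [PySem.Chars.splitOn.go.eq_def]; simp [pvSplit1]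
    | cons c rest =>
      rw [PySem.Chars.splitOn.go.eq_def]
      simp only [List.isPrefixOf]
      by_cases hd : d = c
      · subst hd
        simp only [pvSplit1, beq_self_eq_true, if_pos]
        rw [ih _ _ _ (by simp at h ⊢; omega)]
        simp
      · have hb : (d == c) = false := by simpa using hd
        simp only [hb, Bool.false_and, Bool.false_eq_true, if_false]
        rw [ih rest (c :: cur) acc (by simp at h ⊢; omega)]
        simp [pvSplit1, hb]

theorem pvSplitOn_eq (d : Char) (l : List Char) :
    PySem.Chars.splitOn l [d] = pvSplit1 d [] l := by
  have := pvSplitOn_go_eq d (l.length + 1) l [] [] (by omega)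
  simpa [PySem.Chars.splitOn] using this

theorem pvSplit1_ne_nil (d : Char) (pre l : List Char) : pvSplit1 d pre l ≠ [] := by
  induction l generalizing pre with
  | nil => simp [pvSplit1]
  | cons c rest ih => simp only [pvSplit1]; split <;> simp [ih]

theorem pvSplit1_head (d : Char) (pre l : List Char) :
    (pvSplit1 d pre l).headD [] = pre ++ l.takeWhile (fun c => !(d == c)) := by
  induction l generalizing pre with
  | nil => simp [pvSplit1]
  | cons c rest ih =>
    simp only [pvSplit1, List.takeWhile_cons]
    by_cases hd : (d == c) = true
    · simp [hd]
    · have hb : (d == c) = false := by simpa using hd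
      simpa [hb] using ih (pre ++ [c])

theorem pvSplit1_join (d : Char) (pre l : List Char) :
    PySem.Chars.join [d] (pvSplit1 d pre l) = pre ++ l := by
  induction l generalizing pre with
  | nil => simp [pvSplit1, PySem.Chars.join_singleton]
  | cons c rest ih =>
    simp only [pvSplit1]
    by_cases hd : (d == c) = true
    · have hc : d = c := by simpa using hd
      subst hc
      simp only [hd, if_pos]
      obtain ⟨b, t, hbt⟩ : ∃ b t, pvSplit1 d [] rest = b :: t := by
        cases h : pvSplit1 d [] rest with
        | nil => exact absurd h (pvSplit1_ne_nil d [] rest)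
        | cons b t => exact ⟨b, t, rfl⟩
      rw [hbt, PySem.Chars.join_cons_cons]
      have h2 := ih ([] : List Char)
      rw [hbt] at h2
      rw [h2]
      simp
    · have hb : (d == c) = false := by simpa using hd
      simp [hb, ih]

theorem pvSplit1_join_tail (d : Char) (pre l : List Char) :
    PySem.Chars.join [d] ((pvSplit1 d pre l).drop 1)
      = (l.dropWhile (fun c => !(d == c))).drop 1 := by
  induction l generalizing pre with
  | nil => simp [pvSplit1, PySem.Chars.join_nil]
  | cons c rest ih =>
    simp only [pvSplit1, List.dropWhile_cons]
    by_cases hd : (d == c) = true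
    · simp [hd, pvSplit1_join]
    · have hb : (d == c) = false := by simpa using hd
      simpa [hb] using ih (pre ++ [c])

theorem pvStrip_strip (l : List Char) :
    PySem.Chars.strip (PySem.Chars.strip l) = PySem.Chars.strip l := by
  show PySem.Chars.rstrip (PySem.Chars.lstrip (PySem.Chars.rstrip (PySem.Chars.lstrip l)))
      = PySem.Chars.rstrip (PySem.Chars.lstrip l)
  have hrd : ∀ u : List Char, PySem.Chars.rstrip u = List.rdropWhile PySem.Chars.isspace u := by
    intro u; rfl
  have hld : ∀ u : List Char, PySem.Chars.lstrip u = List.dropWhile PySem.Chars.isspace u := by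
    intro u; rfl
  set p := PySem.Chars.isspace
  set u := List.dropWhile p l with hu
  have hu_self : List.dropWhile p u = u := List.dropWhile_idempotent p l
  have hpre : List.rdropWhile p u <+: u := List.rdropWhile_prefix p u
  have hls : List.dropWhile p (List.rdropWhile p u) = List.rdropWhile p u := by
    rcases hpre with ⟨t, ht⟩
    cases hv : List.rdropWhile p u with
    | nil => simp
    | cons a v' =>
      have hua : u = a :: (v' ++ t) := by rw [← ht, hv]; simp
      have hpa : p a = false := by
        by_contra hpa
        have hpa' : p a = true := by revert hpa; cases p a <;> simp
        rw [hua, List.dropWhile_cons, hpa'] at hu_self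
        simp at hu_self
        have h1 := List.length_dropWhile_le (p := p) (l := v' ++ t)
        have h2 : (List.dropWhile p (v' ++ t)).length = (v' ++ t).length + 1 := by
          rw [hu_self]; simp
        omega
      simp [hpa]
  rw [hld, hrd, hld, hrd, ← hu, hls, List.rdropWhile_idempotent]

theorem pvStrip_subset (l : List Char) : PySem.Chars.strip l ⊆ l := by
  intro x hx
  have h1 : PySem.Chars.strip l ⊆ List.dropWhile PySem.Chars.isspace l := by
    have := List.rdropWhile_prefix PySem.Chars.isspace (List.dropWhile PySem.Chars.isspace l)
    exact fun y hy => this.subset hy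
  exact (List.dropWhile_sublist _).subset (h1 hx)

theorem pvFoldl_push {α β : Type} (step : List β → α → List β) (g : α → β)
    (h : ∀ a c, step a c = a ++ [g c]) (l : List α) (acc : List β) :
    l.foldl step acc = acc ++ l.map g := by
  induction l generalizing acc with
  | nil => simp
  | cons c l ih => simp [List.foldl_cons, h, ih]

theorem pvProcLineMask_eq_map (l m : List Char) :
    pvProcLineMask l m = l.map (fun c => if (c != ' ') && m.contains c then '_' else c) := by
  unfold pvProcLineMask
  exact pvFoldl_push _ _ (fun a c => rfl) l []

-- membership in the chr-mapped alphabet, for printable-domain characters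
set_option maxHeartbeats 1000000 in
theorem pvMem_alphabet (lv : Int) (c : Char) (hc : pvDomChar c = true) :
    (pvMaskAlphabetLv50 lv).contains c = true ↔
      ((97 ≤ (c.toNat : Int) ∧ (c.toNat : Int) ≤ 97 + (lv - 50)) ∨
       (65 ≤ (c.toNat : Int) ∧ (c.toNat : Int) ≤ 65 + (lv - 50))) := by
  have hdom : 9 ≤ c.toNat ∧ c.toNat ≤ 126 := by
    unfold pvDomChar at hc
    simp at hc
    omega
  unfold pvMaskAlphabetLv50
  rw [List.contains_iff_mem]
  simp only [List.mem_append, List.mem_map, PySem.List.mem_pyRange_one]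
  constructor
  · rintro (⟨i, ⟨h1, h2⟩, hch⟩ | ⟨i, ⟨h1, h2⟩, hch⟩) <;>
    · have hto := congrArg Char.toNat hch
      rw [Char.toNat_ofNat] at hto
      by_cases hv : i.toNat.isValidChar
      · rw [if_pos hv] at hto
        have : (c.toNat : Int) = i := by omega
        first
          | exact Or.inl (by omega)
          | exact Or.inr (by omega)
      · rw [if_neg hv] at hto
        omega
  · rintro (⟨h1, h2⟩ | ⟨h1, h2⟩) <;>
    · first
        | refine Or.inl ⟨(c.toNat : Int), ⟨by omega, by omega⟩, ?_⟩
        | refine Or.inr ⟨(c.toNat : Int), ⟨by omega, by omega⟩, ?_⟩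
      rw [Int.toNat_natCast, Char.ofNat_toNat]

-- B's letters list is A's alphabet: shifting the pyRange index
theorem pvRange_map_shift {α : Type} (a m : Int) (f : Int → α) :
    (PySem.List.pyRange 0 m).map (fun i => f (a + i)) = (PySem.List.pyRange a (a + m)).map f := by
  unfold PySem.List.pyRange
  simp only [one_ne_zero, if_false, zero_lt_one, if_pos]
  have hc : (0 : Int) < m ↔ a < a + m := by omega
  by_cases hm : (0 : Int) < m
  · rw [if_pos hm, if_pos (hc.mp hm)]
    simp only [List.map_map]
    have : a + m - a = m - 0 := by ring
    rw [this]
    refine List.map_congr_left (fun k _ => ?_)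
    simp only [Function.comp_apply]
    ring_nf
  · rw [if_neg hm, if_neg (fun h => hm (hc.mpr h))]
    simp

theorem pvLettersB_eq (lv : Int) : pvLettersB lv = pvMaskAlphabetLv50 lv := by
  unfold pvLettersB pvMaskAlphabetLv50
  rw [pvRange_map_shift 97 ((lv - 50) + 1) (fun i => Char.ofNat i.toNat),
      pvRange_map_shift 65 ((lv - 50) + 1) (fun i => Char.ofNat i.toNat)]
  have h1 : 97 + ((lv - 50) + 1) = 97 + (lv - 50) + 1 := by ring
  have h2 : 65 + ((lv - 50) + 1) = 65 + (lv - 50) + 1 := by ring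
  rw [h1, h2]

-- a single-character str.replace is a character map
theorem pvReplace_go_single (d : Char) (fuel : Nat) (l acc : List Char) (h : l.length ≤ fuel) :
    PySem.Chars.replace.go [d] ['_'] fuel l acc
      = acc.reverse ++ l.map (fun x => if d == x then '_' else x) := by
  induction fuel generalizing l acc with
  | zero =>
    cases l with
    | nil => simp [PySem.Chars.replace.go]
    | cons c t => simp at h
  | succ n ih =>
    cases l with
    | nil => simp [PySem.Chars.replace.go]
    | cons c t =>
      rw [PySem.Chars.replace.go.eq_def]
      simp only [List.isPrefixOf, Bool.and_true, List.map_cons]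
      by_cases hd : (d == c) = true
      · rw [if_pos hd]
        simp only [List.length_singleton, List.drop_one, List.tail_cons]
        rw [ih t _ (by simp at h; omega)]
        simp [hd]
      · have hb : (d == c) = false := by simpa using hd
        rw [hb]
        simp only [Bool.false_eq_true, if_false]
        rw [ih t _ (by simp at h; omega)]
        simp [hb]

theorem pvReplace_single (d : Char) (l : List Char) :
    PySem.Chars.replace l [d] ['_'] = l.map (fun x => if d == x then '_' else x) := by
  unfold PySem.Chars.replace
  simp only [List.isEmpty_cons, Bool.false_eq_true, if_false]
  simpa using pvReplace_go_single d l.length l [] (le_refl _)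

-- the fold of replaces over the letter list masks exactly the letters of the list
theorem pvFoldReplace_eq_map (ls body : List Char) :
    ls.foldl (fun b c => PySem.Chars.replace b [c] ['_']) body
      = body.map (fun x => if ls.contains x then '_' else x) := by
  induction ls generalizing body with
  | nil => simp
  | cons c ls ih =>
    rw [List.foldl_cons, ih, pvReplace_single, List.map_map]
    refine List.map_congr_left (fun x _ => ?_)
    simp only [Function.comp_apply, List.contains_cons]
    by_cases hd : (c == x) = true
    · have hcx : c = x := by simpa using hd
      subst hcx
      simp
    · have hxc : ¬ x = c := fun h => hd (by simp [h])
      simp [hxc, show ¬ c = x from fun h => hxc h.symm]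

-- pointwise: A's per-character mask equals the mask by membership (space is never a letter)
theorem pvMask_pointwise (lv : Int) (x : Char) (hx : pvDomChar x = true) :
    (if (pvMaskAlphabetLv50 lv).contains x then '_' else x)
      = if (x != ' ') && (pvMaskAlphabetLv50 lv).contains x then '_' else x := by
  by_cases hsp : x = ' '
  · subst hsp
    have h32 : ((' '.toNat : Nat) : Int) = 32 := by decide
    have hns : (pvMaskAlphabetLv50 lv).contains ' ' = false := by
      by_contra h
      have h' : (pvMaskAlphabetLv50 lv).contains ' ' = true := by
        revert h; cases (pvMaskAlphabetLv50 lv).contains ' ' <;> simp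
      have := (pvMem_alphabet lv ' ' (by decide)).mp h'
      rw [h32] at this
      omega
    rw [hns]
    simp
  · have hne : (x != ' ') = true := by simpa using hsp
    simp [hne]

-- s.partition(".") in terms of takeWhile / dropWhile
theorem pvPartitionDot_eq (t : List Char) :
    pvPartitionDot t
      = (t.takeWhile (fun c => !('.' == c)), t.contains '.',
         (t.dropWhile (fun c => !('.' == c))).drop 1) := by
  induction t with
  | nil => simp [pvPartitionDot]
  | cons c r ih =>
    simp only [pvPartitionDot, List.takeWhile_cons, List.dropWhile_cons, List.contains_cons]
    by_cases hd : (c == '.') = true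
    · have hc : c = '.' := by simpa using hd
      subst hc
      simp
    · have hb : (c == '.') = false := by simpa using hd
      have hb' : ('.' == c) = false := by
        have : ¬ (c = '.') := by simpa using hd
        simpa using fun h => this h.symm
      simp [hb, hb', ih]

set_option maxHeartbeats 1000000 in
theorem pvLine_eq (lv : Int) (line : String) (hc : pvDomStr line = true) :
    (if pvIsMemoryLine (pvLineToNumberBodyPair line.toList) then
       String.ofList ((pvLineToNumberBodyPair line.toList).1 ++ [' '] ++
         pvProcLineMask (pvLineToNumberBodyPair line.toList).2 (pvMaskAlphabetLv50 lv))
     else line)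
      = pvRenderB lv line := by
  have hdomc : ∀ x ∈ line.toList, pvDomChar x = true := by
    unfold pvDomStr at hc
    simpa [List.all_eq_true] using hc
  set t := PySem.Chars.strip line.toList with ht
  have hdomt : ∀ x ∈ t, pvDomChar x = true :=
    fun x hx => hdomc x (pvStrip_subset line.toList hx)
  have hpair1 : (pvLineToNumberBodyPair line.toList).1
      = t.takeWhile (fun c => !('.' == c)) ++ ['.'] := by
    unfold pvLineToNumberBodyPair
    rw [← ht, pvSplitOn_eq]
    dsimp only
    rw [pvSplit1_head]
    simp
  have hpair2 : (pvLineToNumberBodyPair line.toList).2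
      = PySem.Chars.strip ((t.dropWhile (fun c => !('.' == c))).drop 1) := by
    unfold pvLineToNumberBodyPair
    rw [← ht, pvSplitOn_eq]
    dsimp only
    rw [pvSplit1_join_tail]
  set body := PySem.Chars.strip ((t.dropWhile (fun c => !('.' == c))).drop 1) with hbody
  have hrB : pvRenderB lv line
      = (if (t.contains '.') = true ∧ body ≠ [] then
           String.ofList (t.takeWhile (fun c => !('.' == c)) ++ ['.', ' '] ++
             (pvLettersB lv).foldl (fun b c => PySem.Chars.replace b [c] ['_']) body)
         else line) := by
    unfold pvRenderB
    rw [← ht, pvPartitionDot_eq]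
  have hmemline : pvIsMemoryLine (pvLineToNumberBodyPair line.toList)
      = !(body == ([] : List Char)) := by
    unfold pvIsMemoryLine
    rw [hpair2, hbody, pvStrip_strip, ← hbody]
    cases h : (body == ([] : List Char)) <;> simp [h]
  by_cases hdot : '.' ∈ t
  · have hdc : t.contains '.' = true := by simpa [List.contains_iff_mem] using hdot
    rw [hrB]
    by_cases hb : body = []
    · have : pvIsMemoryLine (pvLineToNumberBodyPair line.toList) = false := by
        rw [hmemline, hb]; rfl
      rw [this, if_neg (fun h : (t.contains '.') = true ∧ body ≠ [] => h.2 hb)]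
      simp
    · have hmt : pvIsMemoryLine (pvLineToNumberBodyPair line.toList) = true := by
        rw [hmemline]
        simpa using hb
      rw [hmt, if_pos (show (t.contains '.') = true ∧ body ≠ [] from ⟨hdc, hb⟩)]
      simp only [if_true]
      refine congrArg String.ofList ?_
      rw [hpair1, hpair2, pvProcLineMask_eq_map,
          pvLettersB_eq, pvFoldReplace_eq_map]
      have hdomb : ∀ x ∈ body, pvDomChar x = true := by
        intro x hx
        exact hdomt x (List.dropWhile_sublist _ |>.subset
          (List.drop_subset 1 _ (pvStrip_subset _ hx)))
      rw [List.map_congr_left (fun x hx => (pvMask_pointwise lv x (hdomb x hx)).symm)]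
      simp [List.append_assoc]
  · have hdc : t.contains '.' = false := by simpa [List.contains_iff_mem] using hdot
    have hdw : t.dropWhile (fun c => !('.' == c)) = [] := by
      rw [List.dropWhile_eq_nil_iff]
      intro x hx
      have : ¬ ('.' = x) := fun h => hdot (h ▸ hx)
      simpa using this
    have hbnil : body = [] := by
      rw [hbody, hdw]
      rfl
    have : pvIsMemoryLine (pvLineToNumberBodyPair line.toList) = false := by
      rw [hmemline, hbnil]; rfl
    rw [this, hrB,
        if_neg (fun h : (t.contains '.') = true ∧ body ≠ [] => by rw [hdc] at h; exact absurd h.1 (by simp))]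
    simp

-- ===== VERDICT (by name: the statement is the Claim_ definition above) =====
theorem proc_txt_lv50_65_mask_letter_abc_spec : Claim_equal_proc_txt_lv50_65_mask_letter_abc := by
  intro lines lv hdom _hpre
  unfold Spec_proc_txt_lv50_65_mask_letter_abc
  unfold proc_txt_lv50_65_mask_letter_abc proc_txt_lv50_65_mask_letter_abc_alt
  have hall : ∀ line ∈ lines, pvDomStr line = true := by
    unfold Dom_proc_txt_lv50_65_mask_letter_abc at hdom
    simp [List.all_eq_true] at hdom
    exact hdom.1
  rw [pvFoldl_push _
    (fun line =>
      if pvIsMemoryLine (pvLineToNumberBodyPair line.toList) then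
        String.ofList ((pvLineToNumberBodyPair line.toList).1 ++ [' '] ++
          pvProcLineMask (pvLineToNumberBodyPair line.toList).2 (pvMaskAlphabetLv50 lv))
      else line)
    (fun a c => by dsimp only; split <;> rfl)]
  simp only [List.nil_append]
  exact List.map_congr_left (fun line hmem => pvLine_eq lv line (hall line hmem))
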